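-- pv_equiv track=rewrite | github.com/gpf71/OnTap | BreweryScraper.py | strange_fellows_helper
-- ===== SOURCE A (Python) =====
-- def remove_prefix(text, prefix):
--     if text.startswith(prefix):
--         return text[len(prefix):]
--     return text
--
-- def combine_name_style_abv(fill_name, fill_style, fill_abv):
--     list_of_beers = []
--     for (n, s, a) in zip(fill_name, fill_style, fill_abv):
--         beer = n + " " + s + " " + a + "\n"
--         list_of_beers.append(beer)
--     return list_of_beers
--
-- def strange_fellows_helper(beers_in_cat):
--     b_name = []
--     b_style = []
--     b_abv = []
--     # parse list of beer info
--     x = 0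
--     for beers in beers_in_cat:
--         if x % 2 == 0:
--             name = remove_prefix(beers, '\n')
--             name = name[:-2]
--             name = name.strip()
--             b_name.append(name)
--         else:
--             parts = beers.split('|')
--             style = remove_prefix(parts[0], '\n')
--             style = style.strip()
--             abv = remove_prefix(parts[1], '\n\n')
--             abv = abv[:-1].strip()
--             b_style.append(style)
--             b_abv.append(abv)
--         x += 1
--     return combine_name_style_abv(b_name, b_style, b_abv)
-- ===== SOURCE B (Python) =====
-- def strange_fellows_helper(beers_in_cat):
--     # One pass over consecutive (name entry, style|abv entry) pairs via zip(it, it);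
--     # assembles each line directly, no intermediate name/style/abv lists.
--     it = iter(beers_in_cat)
--     result = []
--     for name_entry, info_entry in zip(it, it):
--         if name_entry.startswith('\n'):
--             name_entry = name_entry[1:]
--         name = name_entry[:-2].strip()
--         parts = info_entry.split('|')
--         style = parts[0]
--         if style.startswith('\n'):
--             style = style[1:]
--         style = style.strip()
--         abv = parts[1]
--         if abv.startswith('\n\n'):
--             abv = abv[2:]
--         abv = abv[:-1].strip()
--         result.append(name + " " + style + " " + abv + "\n")
--     return result
-- ===== Notes on version B (the rewrite author's own statement) =====
-- stated objective: simpler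
-- what changed: B replaces A's three parallel accumulator lists plus a separate zip/combine pass by a single loop over consecutive (name, style|abv) entry pairs (zip(it, it)) that assembles each output line directly.
import Mathlib
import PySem

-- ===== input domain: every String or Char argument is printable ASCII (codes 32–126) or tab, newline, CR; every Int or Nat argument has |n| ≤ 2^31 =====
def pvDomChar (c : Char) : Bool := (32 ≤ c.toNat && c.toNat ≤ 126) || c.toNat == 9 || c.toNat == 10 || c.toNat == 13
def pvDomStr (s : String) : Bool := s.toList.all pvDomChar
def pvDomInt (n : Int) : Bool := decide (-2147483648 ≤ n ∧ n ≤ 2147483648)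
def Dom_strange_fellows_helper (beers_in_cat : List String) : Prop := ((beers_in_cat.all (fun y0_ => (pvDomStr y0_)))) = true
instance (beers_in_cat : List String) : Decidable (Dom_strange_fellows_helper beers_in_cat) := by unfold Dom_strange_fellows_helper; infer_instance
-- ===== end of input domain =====

-- B replaces A's three parallel lists + zip/combine pass by one loop over consecutive
-- (name, style|abv) pairs that assembles each output line directly (objective: simpler).

-- ===== PORT A =====
def pvRemovePrefix (text pre : String) : String :=
  if PySem.Str.startswith text pre then
    PySem.Str.slice text (some (PySem.Str.len pre)) none
  else text

def pvCombine : List String → List String → List String → List String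
  | n :: ns, s :: ss, a :: as => (n ++ " " ++ s ++ " " ++ a ++ "\n") :: pvCombine ns ss as
  | _, _, _ => []

def pvStepA (st : List String × List String × List String × Int) (beers : String) :
    List String × List String × List String × Int :=
  let bn := st.1; let bs := st.2.1; let ba := st.2.2.1; let x := st.2.2.2
  if PySem.Int.mod x 2 == 0 then
    let name := pvRemovePrefix beers "\n"
    let name := PySem.Str.slice name none (some (-2))
    let name := PySem.Str.strip name
    (bn ++ [name], bs, ba, x + 1)
  else
    let parts := (PySem.Str.split? beers "|").getD []
    let style := pvRemovePrefix ((PySem.List.pyGet? parts 0).getD "") "\n"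
    let style := PySem.Str.strip style
    -- parts[1] raises IndexError in Python when '|' is absent; Pre_ excludes that, the default "" only totalizes
    let abv := pvRemovePrefix ((PySem.List.pyGet? parts 1).getD "") "\n\n"
    let abv := PySem.Str.strip (PySem.Str.slice abv none (some (-1)))
    (bn, bs ++ [style], ba ++ [abv], x + 1)

def strange_fellows_helper (beers_in_cat : List String) : List String :=
  let st := beers_in_cat.foldl pvStepA ([], [], [], 0)
  pvCombine st.1 st.2.1 st.2.2.1

-- ===== PORT B =====
def pvPairLine (nameEntry infoEntry : String) : String :=
  let nameEntry := if PySem.Str.startswith nameEntry "\n" then PySem.Str.slice nameEntry (some 1) none else nameEntry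
  let name := PySem.Str.strip (PySem.Str.slice nameEntry none (some (-2)))
  let parts := (PySem.Str.split? infoEntry "|").getD []
  let style := (PySem.List.pyGet? parts 0).getD ""
  let style := if PySem.Str.startswith style "\n" then PySem.Str.slice style (some 1) none else style
  let style := PySem.Str.strip style
  -- parts[1] raises IndexError in Python when '|' is absent; Pre_ excludes that, the default "" only totalizes
  let abv := (PySem.List.pyGet? parts 1).getD ""
  let abv := if PySem.Str.startswith abv "\n\n" then PySem.Str.slice abv (some 2) none else abv
  let abv := PySem.Str.strip (PySem.Str.slice abv none (some (-1)))
  name ++ " " ++ style ++ " " ++ abv ++ "\n"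

def strange_fellows_helper_alt : List String → List String
  | a :: b :: r => pvPairLine a b :: strange_fellows_helper_alt r
  | _ => []

-- ===== PRECONDITION & SPEC =====
-- Pre_ excludes inputs where some odd-indexed entry contains no '|': there Python A (and B) raise IndexError on parts[1].
def Pre_strange_fellows_helper (beers_in_cat : List String) : Prop :=
  ∀ i : Fin beers_in_cat.length, i.val % 2 = 1 → PySem.Str.isIn "|" (beers_in_cat.get i) = true
instance (beers_in_cat : List String) : Decidable (Pre_strange_fellows_helper beers_in_cat) := by
  unfold Pre_strange_fellows_helper; infer_instance

def pvWitness_strange_fellows_helper : List String := ["\nIPA  x\n", "\nLager | 5.5% \n"]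

def Spec_strange_fellows_helper (beers_in_cat : List String) (out : List String) : Prop := out = strange_fellows_helper_alt beers_in_cat
instance (beers_in_cat : List String) (out : List String) : Decidable (Spec_strange_fellows_helper beers_in_cat out) := by unfold Spec_strange_fellows_helper; infer_instance

-- ===== CLAIM (what is proved, stated in full; the proofs are below) =====
def Claim_equal_strange_fellows_helper : Prop := ∀ (beers_in_cat : List String), Dom_strange_fellows_helper beers_in_cat → Pre_strange_fellows_helper beers_in_cat → Spec_strange_fellows_helper beers_in_cat (strange_fellows_helper beers_in_cat)

-- ===== LEMMAS AND PROOFS =====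
theorem pvCombine_append (ns ss as : List String) (n s a : String)
    (h1 : ns.length = ss.length) (h2 : ss.length = as.length) :
    pvCombine (ns ++ [n]) (ss ++ [s]) (as ++ [a]) =
      pvCombine ns ss as ++ [n ++ " " ++ s ++ " " ++ a ++ "\n"] := by
  induction ns generalizing ss as with
  | nil => cases ss <;> cases as <;> simp_all [pvCombine]
  | cons x xs ih =>
    cases ss with
    | nil => simp at h1
    | cons y ys =>
      cases as with
      | nil => simp at h2
      | cons z zs =>
        simp only [List.cons_append, pvCombine, List.cons.injEq, true_and]
        exact ih ys zs (by simpa using h1) (by simpa using h2)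

theorem pvCombine_extra (ns ss as : List String) (n : String)
    (h1 : ns.length = ss.length) (h2 : ss.length = as.length) :
    pvCombine (ns ++ [n]) ss as = pvCombine ns ss as := by
  induction ns generalizing ss as with
  | nil => cases ss <;> cases as <;> simp_all [pvCombine]
  | cons x xs ih =>
    cases ss with
    | nil => simp at h1
    | cons y ys =>
      cases as with
      | nil => simp at h2
      | cons z zs =>
        simp only [List.cons_append, pvCombine, List.cons.injEq, true_and]
        exact ih ys zs (by simpa using h1) (by simpa using h2)

theorem pvLine_eq (a b : String) :
    pvPairLine a b =
      PySem.Str.strip (PySem.Str.slice (pvRemovePrefix a "\n") none (some (-2))) ++ " " ++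
      PySem.Str.strip (pvRemovePrefix ((PySem.List.pyGet? ((PySem.Str.split? b "|").getD []) 0).getD "") "\n") ++ " " ++
      PySem.Str.strip (PySem.Str.slice (pvRemovePrefix ((PySem.List.pyGet? ((PySem.Str.split? b "|").getD []) 1).getD "") "\n\n") none (some (-1))) ++ "\n" := by
  simp only [pvPairLine, pvRemovePrefix]
  simp
  try rfl

theorem pvLoop (l : List String) :
    ∀ (k : Int) (bn bs ba : List String), bn.length = bs.length → bs.length = ba.length →
      (let st := l.foldl pvStepA (bn, bs, ba, 2 * k)
       pvCombine st.1 st.2.1 st.2.2.1) = pvCombine bn bs ba ++ strange_fellows_helper_alt l := by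
  induction l using strange_fellows_helper_alt.induct with
  | case1 a b r ih =>
    intro k bn bs ba h1 h2
    simp only [List.foldl]
    have e1 : pvStepA (bn, bs, ba, 2 * k) a =
        (bn ++ [PySem.Str.strip (PySem.Str.slice (pvRemovePrefix a "\n") none (some (-2)))], bs, ba, 2 * k + 1) := by
      simp [pvStepA, PySem.Int.mod]
    have e2 : ∀ bn', pvStepA (bn', bs, ba, 2 * k + 1) b =
        (bn', bs ++ [PySem.Str.strip (pvRemovePrefix ((PySem.List.pyGet? ((PySem.Str.split? b "|").getD []) 0).getD "") "\n")],
         ba ++ [PySem.Str.strip (PySem.Str.slice (pvRemovePrefix ((PySem.List.pyGet? ((PySem.Str.split? b "|").getD []) 1).getD "") "\n\n") none (some (-1)))],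
         2 * (k + 1)) := by
      intro bn'; simp [pvStepA, PySem.Int.mod]; ring
    rw [e1, e2]
    rw [ih (k + 1) _ _ _ (by simp [h1]) (by simp [h2])]
    rw [pvCombine_append bn bs ba _ _ _ h1 h2]
    simp [strange_fellows_helper_alt, pvLine_eq]
  | case2 l h =>
    intro k bn bs ba h1 h2
    rcases l with _ | ⟨a, _ | ⟨b, r⟩⟩
    · simp [List.foldl, strange_fellows_helper_alt]
    · 
      simp only [List.foldl]
      have e1 : pvStepA (bn, bs, ba, 2 * k) a =
          (bn ++ [PySem.Str.strip (PySem.Str.slice (pvRemovePrefix a "\n") none (some (-2)))], bs, ba, 2 * k + 1) := by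
        simp [pvStepA, PySem.Int.mod]
      rw [e1]
      simp [strange_fellows_helper_alt, pvCombine_extra bn bs ba _ h1 h2]
    · exact absurd rfl (h a b r)

-- ===== VERDICT (by name: the statement is the Claim_ definition above) =====
theorem strange_fellows_helper_spec : Claim_equal_strange_fellows_helper := by
  intro l _ _
  unfold Spec_strange_fellows_helper strange_fellows_helper
  have := pvLoop l 0 [] [] [] rfl rfl
  simpa [pvCombine] using this
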